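-- pv_equiv track=rewrite | github.com/pypi-data/pypi-mirror-156 | packages/drewcopytools/drewcopytools-0.1.5-py3-none-any.whl/drewcopytools/tools.py | split_cmdline_args
-- ===== SOURCE A (Python) =====
-- def split_cmdline_args(input:str):
--   res = []
--   parts = input.split(' ')
--
--   buffer = ''
--   inQuotes = False
--
--   for p in parts:
--     bufferComplete = False
--
--     if inQuotes:
--       buffer += " " + p
--       if buffer.endswith("\""):
--         buffer = buffer[:-1]
--         inQuotes = False
--         bufferComplete = True
--     else:
--       buffer += p
--       if buffer.startswith("\""):
--         if buffer.endswith("\""):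
--           buffer = buffer[1:-1]
--           bufferComplete = True
--         else:
--           inQuotes = True
--           buffer = buffer[1:]
--       else:
--         bufferComplete = True
--
--     if bufferComplete:
--       res.append(buffer)
--       buffer = ''
--
--   return res
-- ===== SOURCE B (Python) =====
-- def split_cmdline_args(input: str):
--     # Different decomposition: token-list recursion with an explicit scan that
--     # joins parts until the closing quote, instead of A's inQuotes/buffer state machine.
--     def close_quote(buffer, parts):
--         # join parts onto buffer until one ends with '"'; return (token, remaining) or None
--         for k in range(len(parts)):
--             buffer = buffer + ' ' + parts[k]
--             if parts[k].endswith('"'):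
--                 return buffer[:-1], parts[k + 1:]
--         return None
--
--     res = []
--     parts = input.split(' ')
--     while parts:
--         p = parts[0]
--         if not p.startswith('"'):
--             res.append(p)
--             parts = parts[1:]
--         elif p.endswith('"'):
--             res.append(p[1:-1])
--             parts = parts[1:]
--         else:
--             closed = close_quote(p[1:], parts[1:])
--             if closed is None:
--                 return res
--             tok, parts = closed
--             res.append(tok)
--     return res
-- ===== Notes on version B (the rewrite author's own statement) =====
-- stated objective: alternative
-- what changed: Replaces A's single pass with an inQuotes/buffer state machine by a token-list while loop that handles each token directly and, on an opening quote, runs an explicit inner scan joining tokens until the closing quote (returning early if it is never closed).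
import Mathlib
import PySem

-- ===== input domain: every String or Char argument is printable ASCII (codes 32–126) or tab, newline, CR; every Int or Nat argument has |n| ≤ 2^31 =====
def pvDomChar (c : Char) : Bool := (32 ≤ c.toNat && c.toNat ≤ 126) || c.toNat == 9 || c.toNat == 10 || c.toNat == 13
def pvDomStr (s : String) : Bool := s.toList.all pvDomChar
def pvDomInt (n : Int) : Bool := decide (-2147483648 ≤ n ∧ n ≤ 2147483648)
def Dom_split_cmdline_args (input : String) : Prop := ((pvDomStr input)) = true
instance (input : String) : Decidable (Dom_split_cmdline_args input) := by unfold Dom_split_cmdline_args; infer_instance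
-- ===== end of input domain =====

-- B replaces A's inQuotes/buffer state machine by a token-list loop with an explicit
-- scan for the closing quote (objective: alternative decomposition, same cost).

-- ===== PORT A =====
-- A's loop body over the state (res, buffer, inQuotes); strings handled on the
-- List Char side via PySem.Chars (exact wrappers of Python's str operations).
def pvAStep (st : List (List Char) × List Char × Bool) (p : List Char) :
    List (List Char) × List Char × Bool :=
  let res := st.1
  let buffer := st.2.1
  let inQuotes := st.2.2
  if inQuotes then
    -- buffer += " " + p
    let buffer := buffer ++ ' ' :: p
    if PySem.Chars.endswith buffer ['"'] then
      (res ++ [PySem.Chars.slice buffer none (some (-1))], [], false)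
    else
      (res, buffer, true)
  else
    -- buffer += p
    let buffer := buffer ++ p
    if PySem.Chars.startswith buffer ['"'] then
      if PySem.Chars.endswith buffer ['"'] then
        (res ++ [PySem.Chars.slice buffer (some 1) (some (-1))], [], false)
      else
        (res, PySem.Chars.slice buffer (some 1) none, true)
    else
      (res ++ [buffer], [], false)

def split_cmdline_args (input : String) : List String :=
  ((PySem.Chars.splitOn input.toList [' ']).foldl pvAStep ([], [], false)).1.map String.ofList

-- ===== PORT B =====
-- B's close_quote helper: join parts onto buffer until one ends with '"';
-- returns (token, remaining parts) or none if the quote is never closed.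
def pvCloseQuote (buffer : List Char) : List (List Char) → Option (List Char × List (List Char))
  | [] => none
  | q :: rest =>
    let buffer' := buffer ++ ' ' :: q
    if PySem.Chars.endswith q ['"'] then
      some (PySem.Chars.slice buffer' none (some (-1)), rest)
    else
      pvCloseQuote buffer' rest

theorem pvCloseQuote_length (buffer : List Char) (l : List (List Char))
    (tok : List Char) (rest' : List (List Char)) (h : pvCloseQuote buffer l = some (tok, rest')) :
    rest'.length < l.length := by
  induction l generalizing buffer with
  | nil => simp [pvCloseQuote] at h
  | cons q rest ih =>
    simp only [pvCloseQuote] at h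
    split at h
    · cases h; simp
    · exact Nat.lt_trans (ih _ h) (by simp)

-- B's main while loop over the remaining parts, with the output accumulator.
def pvGoAlt (out : List (List Char)) : List (List Char) → List (List Char)
  | [] => out
  | p :: rest =>
    if ¬ PySem.Chars.startswith p ['"'] then
      pvGoAlt (out ++ [p]) rest
    else if PySem.Chars.endswith p ['"'] then
      pvGoAlt (out ++ [PySem.Chars.slice p (some 1) (some (-1))]) rest
    else
      match h : pvCloseQuote (PySem.Chars.slice p (some 1) none) rest with
      | none => out
      | some (tok, rest') => pvGoAlt (out ++ [tok]) rest'
termination_by l => l.length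
decreasing_by
  · simp
  · simp
  · exact Nat.lt_trans (pvCloseQuote_length _ _ _ _ h) (by simp)

def split_cmdline_args_alt (input : String) : List String :=
  (pvGoAlt [] (PySem.Chars.splitOn input.toList [' '])).map String.ofList

-- ===== PRECONDITION & SPEC =====
def Spec_split_cmdline_args (input : String) (out : List String) : Prop := out = split_cmdline_args_alt input
instance (input : String) (out : List String) : Decidable (Spec_split_cmdline_args input out) := by unfold Spec_split_cmdline_args; infer_instance

-- ===== CLAIM (what is proved, stated in full; the proofs are below) =====
def Claim_equal_split_cmdline_args : Prop := ∀ (input : String), Dom_split_cmdline_args input → Spec_split_cmdline_args input (split_cmdline_args input)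

-- ===== LEMMAS AND PROOFS =====

-- Appending " " + q keeps the last character of q (or is ' ' if q is empty),
-- so Python's buffer.endswith('"') in the inQuotes branch equals q.endswith('"').
theorem pv_endswith_append (b q : List Char) :
    PySem.Chars.endswith (b ++ ' ' :: q) ['"'] = PySem.Chars.endswith q ['"'] := by
  rcases q.eq_nil_or_concat with rfl | ⟨q', c, rfl⟩
  · have h1 : PySem.Chars.endswith (b ++ [' ']) ['"'] = false := by
      rw [Bool.eq_false_iff]
      intro hc
      obtain ⟨t, ht⟩ := (PySem.Chars.endswith_iff _ _).1 hc
      have := congrArg List.getLast? ht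
      simp at this
    have h2 : PySem.Chars.endswith ([] : List Char) ['"'] = false := by decide
    rw [h1, h2]
  · simp only [List.concat_eq_append]
    by_cases hc : c = '"'
    · subst hc
      have h1 : PySem.Chars.endswith (q' ++ ['"']) ['"'] = true :=
        (PySem.Chars.endswith_iff _ _).2 ⟨q', rfl⟩
      have h2 : PySem.Chars.endswith (b ++ ' ' :: (q' ++ ['"'])) ['"'] = true :=
        (PySem.Chars.endswith_iff _ _).2 ⟨b ++ ' ' :: q', by simp⟩
      rw [h1, h2]
    · have h1 : PySem.Chars.endswith (q' ++ [c]) ['"'] = false := by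
        rw [Bool.eq_false_iff]
        intro hcc
        obtain ⟨t, ht⟩ := (PySem.Chars.endswith_iff _ _).1 hcc
        have h := congrArg List.getLast? ht
        simp at h
        exact hc h.symm
      have h2 : PySem.Chars.endswith (b ++ ' ' :: (q' ++ [c])) ['"'] = false := by
        rw [Bool.eq_false_iff]
        intro hcc
        obtain ⟨t, ht⟩ := (PySem.Chars.endswith_iff _ _).1 hcc
        have h := congrArg List.getLast? ht
        simp at h
        have hx : (' ' :: (q' ++ [c])).getLast? = some c := by
          rw [show (' ' :: (q' ++ [c])) = (' ' :: q') ++ [c] by simp]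
          exact List.getLast?_concat
        rw [hx] at h
        simp at h
        exact hc h.symm
      rw [h1, h2]

-- A's fold while inQuotes = true computes exactly B's close_quote scan.
theorem pv_fold_inQuotes (l : List (List Char)) (res : List (List Char)) (b : List Char) :
    (l.foldl pvAStep (res, b, true)).1 =
      (match pvCloseQuote b l with
       | none => res
       | some (tok, rest') => (rest'.foldl pvAStep (res ++ [tok], [], false)).1) := by
  induction l generalizing b with
  | nil => simp [pvCloseQuote]
  | cons q rest ih =>
    simp only [List.foldl_cons, pvCloseQuote, pvAStep]
    rw [pv_endswith_append]
    by_cases he : PySem.Chars.endswith q ['"'] = true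
    · simp [he]
    · simp only [Bool.not_eq_true] at he
      simp [he, ih]

-- A's fold from the reset state (empty buffer, not in quotes) computes B's loop.
theorem pv_fold_eq_goAlt (n : Nat) (l : List (List Char)) (hl : l.length ≤ n)
    (res : List (List Char)) :
    (l.foldl pvAStep (res, [], false)).1 = pvGoAlt res l := by
  induction n generalizing l res with
  | zero =>
    have : l = [] := List.length_eq_zero_iff.1 (Nat.le_zero.1 hl)
    subst this
    simp [pvGoAlt]
  | succ n ih =>
    cases l with
    | nil => simp [pvGoAlt]
    | cons p rest =>
      have hr : rest.length ≤ n := by simp at hl; omega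
      simp only [List.foldl_cons, pvAStep, pvGoAlt, List.nil_append]
      by_cases hs : PySem.Chars.startswith p ['"'] = true
      · by_cases he : PySem.Chars.endswith p ['"'] = true
        · simp only [hs, he, if_true, not_true, if_false]
          exact ih rest hr _
        · simp only [Bool.not_eq_true] at he
          simp only [hs, he, if_true, Bool.false_eq_true, if_false, not_true]
          rw [pv_fold_inQuotes]
          cases hq : pvCloseQuote (PySem.Chars.slice p (some 1) none) rest with
          | none => simp
          | some tr =>
            obtain ⟨tok, rest'⟩ := tr
            have hlen : rest'.length < rest.length := pvCloseQuote_length _ _ _ _ hq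
            simp only []
            exact ih rest' (by omega) _
      · simp only [Bool.not_eq_true] at hs
        simp only [hs, Bool.false_eq_true, if_false, not_false_iff, if_true]
        exact ih rest hr _

-- ===== VERDICT (by name: the statement is the Claim_ definition above) =====
theorem split_cmdline_args_spec : Claim_equal_split_cmdline_args := by
  intro input _
  unfold Spec_split_cmdline_args split_cmdline_args split_cmdline_args_alt
  rw [pv_fold_eq_goAlt (PySem.Chars.splitOn input.toList [' ']).length _ le_rfl]
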